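-- pv_equiv track=rewrite | github.com/hatalski/Artificial-Intelligence-Projects | projects/week4/PlayerAI.py | find_mergeable_pairs
-- ===== SOURCE A (Python) =====
-- def find_mergeable_pairs(l):
--   pairs = 0
--   looked_up = set()
--   size = len(l)
--   for i in range(0, size):
--     v = l[i]
--     if v == 0 or v in looked_up:
--       continue
--     n = i
--     encounters = {v: 1}
--     while n + 1 < size:
--       n += 1
--       if l[n] == 0:
--         continue
--       if l[n] == v:
--         encounters[v] += 1
--       else:
--         break
--     #if encounters[v] % 2 == 0:
--     if encounters[v] // 2 > 0:
--       pairs += encounters[v] // 2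
--       looked_up.add(v)
--
--   return pairs
-- ===== SOURCE B (Python) =====
-- def _runs(xs):
--     # compress a zero-free list into maximal runs of equal values: [(value, run_length), ...]
--     runs = []
--     i = 0
--     n = len(xs)
--     while i < n:
--         v = xs[i]
--         j = i + 1
--         while j < n and xs[j] == v:
--             j += 1
--         runs.append((v, j - i))
--         i = j
--     return runs
--
--
-- def find_mergeable_pairs(l):
--     total = 0
--     blocked = set()
--     for v, c in _runs([x for x in l if x != 0]):
--         if v not in blocked and c >= 2:
--             total += c // 2
--             blocked.add(v)
--     return total
-- ===== Notes on version B (the rewrite author's own statement) =====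
-- stated objective: alternative
-- what changed: B drops zeros and compresses the line into (value, run-length) groups in one pass, then totals run_length//2 per first merge-yielding run of each value via a blocked set, instead of A's per-index forward rescans driven by a one-key dict and a looked_up set.
import Mathlib
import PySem

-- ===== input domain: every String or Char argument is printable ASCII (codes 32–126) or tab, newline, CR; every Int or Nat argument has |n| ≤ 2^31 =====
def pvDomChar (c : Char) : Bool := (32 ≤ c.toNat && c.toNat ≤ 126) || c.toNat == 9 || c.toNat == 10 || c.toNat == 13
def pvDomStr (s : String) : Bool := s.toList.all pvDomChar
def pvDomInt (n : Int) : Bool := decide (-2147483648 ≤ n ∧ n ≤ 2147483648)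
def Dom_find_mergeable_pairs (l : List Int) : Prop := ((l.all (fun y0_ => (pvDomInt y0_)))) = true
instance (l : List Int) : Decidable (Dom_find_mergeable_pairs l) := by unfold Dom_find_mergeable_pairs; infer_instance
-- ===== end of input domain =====

-- B replaces A's per-index rescans with a one-key dict by a single run-length compression of the
-- zero-filtered line followed by one pass over the runs with a blocked set (alternative decomposition).


-- ===== PORT A =====
-- A's inner 'while n + 1 < size' loop; A's dict 'encounters = {v: …}' only ever holds
-- the single key v, so it is represented by that entry's count 'cnt'.
def aScan (l : List Int) (v : Int) (n : Nat) (cnt : Int) : Int :=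
  if h : n + 1 < l.length then
    if l[n+1] = 0 then aScan l v (n+1) cnt
    else if l[n+1] = v then aScan l v (n+1) (cnt + 1)
    else cnt                                     -- break
  else cnt
termination_by l.length - n

-- A's outer 'for i in range(0, size)' loop with state (looked_up, pairs);
-- l[i] is always in range since i < size, so direct indexing is exact.
def aOuter (l : List Int) (i : Nat) (lookedUp : PySem.Set Int) (pairs : Int) : Int :=
  if h : i < l.length then
    let v := l[i]
    if v = 0 ∨ lookedUp.contains v then aOuter l (i+1) lookedUp pairs
    else
      let c := aScan l v i 1
      if PySem.Int.floordiv c 2 > 0 then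
        aOuter l (i+1) (lookedUp.add v) (pairs + PySem.Int.floordiv c 2)
      else aOuter l (i+1) lookedUp pairs
  else pairs
termination_by l.length - i

def find_mergeable_pairs (l : List Int) : Int := aOuter l 0 PySem.Set.empty 0

-- ===== PORT B =====
-- B's inner 'while j < n and xs[j] == v' loop of _runs: returns the final j
def runEnd (xs : List Int) (v : Int) (j : Nat) : Nat :=
  if h : j < xs.length then
    if xs[j] = v then runEnd xs v (j+1) else j
  else j
termination_by xs.length - j

-- termination facts for runsFrom (cited by its decreasing_by)
theorem le_runEnd (xs : List Int) (v : Int) (j : Nat) : j ≤ runEnd xs v j := by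
  fun_induction runEnd xs v j with
  | case1 j h hv ih => omega
  | case2 j h hv => omega
  | case3 j h => omega

theorem lt_runEnd_of_lt (xs : List Int) (v : Int) (i j : Nat) (h : i < j) : i < runEnd xs v j :=
  lt_of_lt_of_le h (le_runEnd xs v j)

-- B's outer 'while i < n' loop of _runs, building the run list
def runsFrom (xs : List Int) (i : Nat) : List (Int × Int) :=
  if h : i < xs.length then
    let j := runEnd xs xs[i] (i+1)
    (xs[i], ((j - i : Nat) : Int)) :: runsFrom xs j
  else []
termination_by xs.length - i
decreasing_by have := lt_runEnd_of_lt xs xs[i] i (i+1) (by omega); omega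

-- B's 'for v, c in _runs(...)' loop with state (blocked, total)
def foldRuns : List (Int × Int) → PySem.Set Int → Int → Int
  | [], _, total => total
  | (v, c) :: rs, blocked, total =>
    if ¬ blocked.contains v ∧ c ≥ 2 then
      foldRuns rs (blocked.add v) (total + PySem.Int.floordiv c 2)
    else foldRuns rs blocked total

def find_mergeable_pairs_alt (l : List Int) : Int :=
  foldRuns (runsFrom (l.filter (fun x => x ≠ 0)) 0) PySem.Set.empty 0

-- ===== PRECONDITION & SPEC =====
def Spec_find_mergeable_pairs (l : List Int) (out : Int) : Prop := out = find_mergeable_pairs_alt l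
instance (l : List Int) (out : Int) : Decidable (Spec_find_mergeable_pairs l out) := by unfold Spec_find_mergeable_pairs; infer_instance

-- ===== CLAIM (what is proved, stated in full; the proofs are below) =====
def Claim_equal_find_mergeable_pairs : Prop := ∀ (l : List Int), Dom_find_mergeable_pairs l → Spec_find_mergeable_pairs l (find_mergeable_pairs l)

-- ===== LEMMAS AND PROOFS =====

-- proof-only intermediate: A's outer loop re-expressed structurally on the zero-filtered suffix
def outerF : List Int → PySem.Set Int → Int → Int
  | [], _, p => p
  | v :: rest, s, p =>
    if s.contains v then outerF rest s p
    else
      let c : Int := 1 + (rest.takeWhile (fun x => x = v)).length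
      if PySem.Int.floordiv c 2 > 0 then outerF rest (s.add v) (p + PySem.Int.floordiv c 2)
      else outerF rest s p

theorem aScan_eq (l : List Int) (v : Int) (n : Nat) (cnt : Int) :
    aScan l v n cnt =
      cnt + (((l.drop (n+1)).filter (fun x => x ≠ 0)).takeWhile (fun x => x = v)).length := by
  fun_induction aScan l v n cnt with
  | case1 n cnt h h0 ih =>
    rw [ih]
    rw [List.drop_eq_getElem_cons h]
    simp [h0]
  | case2 n cnt h h0 hv ih =>
    have hv0 : v ≠ 0 := hv ▸ h0
    rw [ih, List.drop_eq_getElem_cons h, List.filter_cons]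
    simp [hv, hv0]
    ring
  | case3 n cnt h h0 hv =>
    rw [List.drop_eq_getElem_cons h, List.filter_cons]
    simp [h0, hv]
  | case4 n cnt h =>
    have : l.length ≤ n + 1 := by omega
    simp [List.drop_eq_nil_of_le this]

theorem outerF_cons_mem (v : Int) (rest : List Int) (s : PySem.Set Int) (p : Int)
    (hm : PySem.Set.contains s v = true) : outerF (v :: rest) s p = outerF rest s p := by
  simp at hm
  simp [outerF, hm]

theorem outerF_cons_not_mem (v : Int) (rest : List Int) (s : PySem.Set Int) (p : Int)
    (hm : PySem.Set.contains s v = false) :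
    outerF (v :: rest) s p =
      if PySem.Int.floordiv (1 + ((rest.takeWhile (fun x => x = v)).length : Int)) 2 > 0 then
        outerF rest (s.add v) (p + PySem.Int.floordiv (1 + ((rest.takeWhile (fun x => x = v)).length : Int)) 2)
      else outerF rest s p := by
  simp at hm
  simp [outerF, hm]

theorem aOuter_eq (l : List Int) (i : Nat) (s : PySem.Set Int) (p : Int) :
    aOuter l i s p = outerF ((l.drop i).filter (fun x => x ≠ 0)) s p := by
  fun_induction aOuter l i s p with
  | case1 i s p h v hskip ih =>
    rw [ih, List.drop_eq_getElem_cons h, List.filter_cons]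
    rcases hskip with h0 | hm
    · have h0' : l[i] = (0:Int) := h0
      rw [if_neg (by simp [h0'])]
    · have hm' : PySem.Set.contains s l[i] = true := hm
      by_cases h0 : l[i] = (0:Int)
      · rw [if_neg (by simp [h0])]
      · rw [if_pos (by simp [h0]), outerF_cons_mem _ _ _ _ hm']
  | case2 i s p h v hskip c hdiv ih =>
    have h0 : l[i] ≠ (0:Int) := fun h' => hskip (Or.inl h')
    have hm : PySem.Set.contains s l[i] = false := by
      cases hEq : PySem.Set.contains s l[i]
      · rfl
      · exact absurd (Or.inr hEq) hskip
    have hc : c = aScan l l[i] i 1 := rfl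
    rw [hc, aScan_eq] at hdiv ih ⊢
    rw [ih, List.drop_eq_getElem_cons h, List.filter_cons, if_pos (by simp [h0]),
      outerF_cons_not_mem _ _ _ _ hm, if_pos hdiv]
  | case3 i s p h v hskip c hdiv ih =>
    have h0 : l[i] ≠ (0:Int) := fun h' => hskip (Or.inl h')
    have hm : PySem.Set.contains s l[i] = false := by
      cases hEq : PySem.Set.contains s l[i]
      · rfl
      · exact absurd (Or.inr hEq) hskip
    have hc : c = aScan l l[i] i 1 := rfl
    rw [hc, aScan_eq] at hdiv
    rw [ih, List.drop_eq_getElem_cons h, List.filter_cons, if_pos (by simp [h0]),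
      outerF_cons_not_mem _ _ _ _ hm, if_neg hdiv]
  | case4 i s p h =>
    have : l.length ≤ i := by omega
    simp [List.drop_eq_nil_of_le this, outerF]

-- proof-only: the run list expressed as a structural recursion on the list
def runAux (v : Int) : List Int → Int → Int × List Int
  | [], run => (run, [])
  | x :: r, run => if x = v then runAux v r (run + 1) else (run, x :: r)

theorem runAux_len_le (v : Int) (r : List Int) (run : Int) :
    (runAux v r run).2.length ≤ r.length := by
  induction r generalizing run with
  | nil => simp [runAux]
  | cons x r ih =>
    simp only [runAux]
    split
    · exact le_trans (ih _) (by simp)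
    · simp

def runsRec : List Int → List (Int × Int)
  | [] => []
  | x :: r =>
    let p := runAux x r 1
    (x, p.1) :: runsRec p.2
termination_by xs => xs.length
decreasing_by exact Nat.lt_succ_of_le (runAux_len_le x r 1)

theorem runAux_spec (v : Int) (r : List Int) (run : Int) :
    runAux v r run = (run + ((r.takeWhile (fun x => x = v)).length : Int), r.dropWhile (fun x => x = v)) := by
  induction r generalizing run with
  | nil => simp [runAux]
  | cons x r ih =>
    by_cases hx : x = v
    · simp [runAux, hx, ih]
      ring
    · simp [runAux, hx]

theorem runEnd_eq (xs : List Int) (v : Int) (j : Nat) :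
    runEnd xs v j = j + ((xs.drop j).takeWhile (fun x => x = v)).length := by
  fun_induction runEnd xs v j with
  | case1 j h hv ih =>
    rw [ih, List.drop_eq_getElem_cons h]
    simp [hv]
    omega
  | case2 j h hv =>
    rw [List.drop_eq_getElem_cons h]
    simp [hv]
  | case3 j h =>
    have : xs.length ≤ j := by omega
    simp [List.drop_eq_nil_of_le this]

theorem dropWhile_eq_drop_len (l : List Int) (p : Int → Bool) :
    l.drop (l.takeWhile p).length = l.dropWhile p := by
  nth_rewrite 2 [← List.takeWhile_append_dropWhile (p := p) (l := l)]
  exact List.drop_left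

theorem runsFrom_eq (xs : List Int) (i : Nat) : runsFrom xs i = runsRec (xs.drop i) := by
  fun_induction runsFrom xs i with
  | case1 i h j ih =>
    have hj : j = runEnd xs xs[i] (i+1) := rfl
    rw [runEnd_eq] at hj
    rw [List.drop_eq_getElem_cons h, runsRec]
    have hdrop : xs.drop j = (xs.drop (i+1)).dropWhile (fun x => x = xs[i]) := by
      rw [hj, ← dropWhile_eq_drop_len (xs.drop (i+1)) (fun x => decide (x = xs[i]))]
      rw [Nat.add_comm, List.drop_drop]
      congr 1
      omega
    congr 1
    · rw [runAux_spec]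
      simp only
      congr 1
      rw [hj]
      omega
    · rw [ih, hdrop, runAux_spec]
  | case2 i h =>
    have : xs.length ≤ i := by omega
    simp [List.drop_eq_nil_of_le this, runsRec]

theorem outerF_skip (t rest : List Int) (s : PySem.Set Int) (p : Int)
    (h : ∀ x ∈ t, x ∈ s) : outerF (t ++ rest) s p = outerF rest s p := by
  induction t with
  | nil => rfl
  | cons x t ih =>
    rw [List.cons_append, outerF_cons_mem _ _ _ _ (by simpa using h x (by simp))]
    exact ih (fun y hy => h y (by simp [hy]))

theorem floordiv_pos_iff (c : Int) (hc : 1 ≤ c) : PySem.Int.floordiv c 2 > 0 ↔ c ≥ 2 := by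
  rw [PySem.Int.floordiv_eq_ediv_of_pos (by omega)]
  omega

theorem outerF_eq_foldRuns (xs : List Int) (s : PySem.Set Int) (p : Int) :
    outerF xs s p = foldRuns (runsRec xs) s p := by
  fun_induction runsRec xs generalizing s p with
  | case1 => rfl
  | case2 v r q ih =>
    have hq : q = runAux v r 1 := rfl
    rw [runAux_spec] at hq
    have hq1 : q.1 = 1 + ((r.takeWhile (fun x => x = v)).length : Int) := by rw [hq]
    have hq2 : q.2 = r.dropWhile (fun x => x = v) := by rw [hq]
    have hsplit : r = r.takeWhile (fun x => x = v) ++ r.dropWhile (fun x => x = v) :=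
      (List.takeWhile_append_dropWhile).symm
    have hall : ∀ x ∈ r.takeWhile (fun x => x = v), x = v := by
      intro x hx
      simpa using List.mem_takeWhile_imp hx
    have hc1 : (1 : Int) ≤ q.1 := by rw [hq1]; omega
    by_cases hm : (v ∈ s)
    · rw [foldRuns, if_neg (by simp [hm])]
      rw [outerF_cons_mem _ _ _ _ (by simpa using hm)]
      calc outerF r s p = outerF (r.takeWhile (fun x => x = v) ++ r.dropWhile (fun x => x = v)) s p := by rw [← hsplit]
        _ = outerF (r.dropWhile (fun x => x = v)) s p := outerF_skip _ _ _ _ (fun x hx => (hall x hx) ▸ hm)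
        _ = foldRuns (runsRec q.2) s p := by
            rw [hq2]
            have h := ih s p
            rw [hq2] at h
            exact h
    · rw [outerF_cons_not_mem _ _ _ _ (by simpa using hm)]
      rw [← hq1]
      by_cases h2 : q.1 ≥ 2
      · rw [if_pos ((floordiv_pos_iff _ hc1).mpr h2)]
        rw [foldRuns, if_pos ⟨by simp [hm], h2⟩]
        calc outerF r (s.add v) (p + PySem.Int.floordiv q.1 2)
            = outerF (r.takeWhile (fun x => x = v) ++ r.dropWhile (fun x => x = v)) (s.add v) (p + PySem.Int.floordiv q.1 2) := by rw [← hsplit]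
          _ = outerF (r.dropWhile (fun x => x = v)) (s.add v) (p + PySem.Int.floordiv q.1 2) := by
              refine outerF_skip _ _ _ _ (fun x hx => ?_)
              rw [hall x hx, PySem.Set.mem_add]
              exact Or.inr rfl
          _ = foldRuns (runsRec q.2) (s.add v) (p + PySem.Int.floordiv q.1 2) := by
              rw [hq2]
              have h := ih (s.add v) (p + PySem.Int.floordiv q.1 2)
              rw [hq2] at h
              exact h
      · rw [if_neg (fun hp => h2 ((floordiv_pos_iff _ hc1).mp hp))]
        rw [foldRuns, if_neg (by rintro ⟨-, h⟩; exact h2 h)]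
        have htw : r.takeWhile (fun x => x = v) = [] := by
          have : ((r.takeWhile (fun x => x = v)).length : Int) = 0 := by omega
          simpa using this
        have hr : r = q.2 := by
          conv_lhs => rw [hsplit]
          rw [htw, hq2]
          rfl
        rw [hr]
        exact ih s p

-- ===== VERDICT (by name: the statement is the Claim_ definition above) =====
theorem find_mergeable_pairs_spec : Claim_equal_find_mergeable_pairs := by
  intro l _
  show _ = _
  rw [find_mergeable_pairs, aOuter_eq, find_mergeable_pairs_alt, runsFrom_eq, ← outerF_eq_foldRuns]
  simp
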